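-- pv_equiv track=rewrite | github.com/ychen99/wki-wise23 | rfc.py | find_first_triple_one
-- ===== SOURCE A (Python) =====
-- def find_first_triple_one(sequence):
--     """
--     determine the first index of three continous window, whose label is 1
--     :param sequence: A list of binary numbers.
--     :return: first index of three continous 1 windows
--     """
--     if len(sequence) < 3:  # less than three windows, return 0
--         return 0
--     # initialized sum of first three numbers
--     window_sum = sequence[0] + sequence[1] + sequence[2]
--     # is the first 3 number are all 1, return index 0
--     if window_sum == 3:
--         return 0
--     for i in range(3, len(sequence)):
--         # updata the sum
--         window_sum += sequence[i] - sequence[i-3]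
--         # check if the sum is 3
--         if window_sum == 3:
--             return i - 2  # return index of first window with 1
--     return 0  # if no three continous 1, return 0
-- ===== SOURCE B (Python) =====
-- def find_first_triple_one(sequence):
--     # prefix-sum table: p[k] = sum of the first k elements
--     p = [0]
--     for x in sequence:
--         p.append(p[-1] + x)
--     # first window start i with sum 3, default 0 (also covers len < 3)
--     return next((i for i in range(len(sequence) - 2) if p[i + 3] - p[i] == 3), 0)
-- ===== Notes on version B (the rewrite author's own statement) =====
-- stated objective: alternative
-- what changed: Replaces the incremental sliding-window sum with an early return inside the loop by a prefix-sum table p built once, then a single generator scan returning the first window start i with p[i+3]-p[i]==3 (default 0).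
import Mathlib
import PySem

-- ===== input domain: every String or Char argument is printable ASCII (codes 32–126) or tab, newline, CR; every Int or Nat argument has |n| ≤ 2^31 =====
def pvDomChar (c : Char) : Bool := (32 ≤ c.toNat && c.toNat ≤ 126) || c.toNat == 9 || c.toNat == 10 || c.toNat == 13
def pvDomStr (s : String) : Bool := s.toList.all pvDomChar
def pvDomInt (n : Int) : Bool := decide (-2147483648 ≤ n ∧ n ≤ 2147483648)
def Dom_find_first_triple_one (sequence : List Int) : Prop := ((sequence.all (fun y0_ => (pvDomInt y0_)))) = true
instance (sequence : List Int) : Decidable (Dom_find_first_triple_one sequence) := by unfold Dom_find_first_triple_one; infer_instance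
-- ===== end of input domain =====

-- B replaces A's incremental sliding-window sum (with early return) by a prefix-sum
-- table scanned once for the first window with sum 3; same cost, different decomposition.

-- ===== PORT A =====
-- the 'for i in range(3, len(sequence))' loop with its early 'return i - 2'
def pvALoop (sequence : List Int) (i : Nat) (window_sum : Int) : Int :=
  if _h : i < sequence.length then
    let ws' := window_sum + (PySem.List.pyGet? sequence (i : Int)).getD 0
                 - (PySem.List.pyGet? sequence ((i : Int) - 3)).getD 0
    if ws' = 3 then (i : Int) - 2 else pvALoop sequence (i + 1) ws'
  else 0
termination_by sequence.length - i

def find_first_triple_one (sequence : List Int) : Int :=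
  if sequence.length < 3 then 0
  else
    let window_sum := (PySem.List.pyGet? sequence 0).getD 0
      + (PySem.List.pyGet? sequence 1).getD 0 + (PySem.List.pyGet? sequence 2).getD 0
    if window_sum = 3 then 0
    else pvALoop sequence 3 window_sum

-- ===== PORT B =====
-- the 'p = [0]; for x in sequence: p.append(p[-1] + x)' loop of Source B
def pvBPrefix (sequence : List Int) : List Int :=
  sequence.foldl (fun acc x => acc ++ [(PySem.List.pyGet? acc (-1)).getD 0 + x]) [0]

def find_first_triple_one_alt (sequence : List Int) : Int :=
  let p := pvBPrefix sequence
  match (PySem.List.pyRange 0 ((sequence.length : Int) - 2) 1).find?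
      (fun i => (PySem.List.pyGet? p (i + 3)).getD 0 - (PySem.List.pyGet? p i).getD 0 == 3) with
  | some i => i
  | none => 0

-- ===== PRECONDITION & SPEC =====
def Spec_find_first_triple_one (sequence : List Int) (out : Int) : Prop := out = find_first_triple_one_alt sequence
instance (sequence : List Int) (out : Int) : Decidable (Spec_find_first_triple_one sequence out) := by unfold Spec_find_first_triple_one; infer_instance

-- ===== CLAIM (what is proved, stated in full; the proofs are below) =====
def Claim_equal_find_first_triple_one : Prop := ∀ (sequence : List Int), Dom_find_first_triple_one sequence → Spec_find_first_triple_one sequence (find_first_triple_one sequence)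

-- ===== LEMMAS AND PROOFS =====

-- window sum starting at k (0 past the end)
def pvW (sequence : List Int) (k : Nat) : Int :=
  sequence.getD k 0 + sequence.getD (k + 1) 0 + sequence.getD (k + 2) 0

theorem pvFind?_congr {α : Type} (l : List α) (p q : α → Bool)
    (h : ∀ a ∈ l, p a = q a) : l.find? p = l.find? q := by
  induction l with
  | nil => rfl
  | cons x xs ih =>
    simp only [List.find?]
    rw [h x (by simp)]
    cases q x with
    | true => rfl
    | false => exact ih (fun a ha => h a (by simp [ha]))

-- the prefix table B builds
theorem pvPrefix_eq (xs : List Int) :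
    pvBPrefix xs = (List.range (xs.length + 1)).map (fun k => ((xs.take k).sum)) := by
  unfold pvBPrefix
  induction xs using List.reverseRecOn with
  | nil => simp [List.range_succ]
  | append_singleton xs x ih =>
    rw [List.foldl_append, List.foldl_cons, List.foldl_nil, ih]
    have hl : (xs ++ [x]).length + 1 = (xs.length + 1) + 1 := by simp
    rw [hl, List.range_succ (n := xs.length + 1), List.map_append]
    congr 1
    · apply List.map_congr_left
      intro k hk
      rw [List.mem_range] at hk
      rw [List.take_append_of_le_length (by omega)]
    · rw [List.range_succ, List.map_append]
      simp only [List.map_cons, List.map_nil]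
      rw [PySem.List.pyGet?_neg_one]
      simp [List.take_of_length_le, List.sum_append]

theorem pvP_get (xs : List Int) (k : Nat) (hk : k ≤ xs.length) :
    (PySem.List.pyGet? (pvBPrefix xs) (k : Int)).getD 0 = (xs.take k).sum := by
  rw [pvPrefix_eq, PySem.List.pyGet?_natCast]
  rw [List.getElem?_map, List.getElem?_range (by omega)]
  rfl

theorem pvSum_take_diff (xs : List Int) (k : Nat) (hk : k + 3 ≤ xs.length) :
    (xs.take (k + 3)).sum - (xs.take k).sum = pvW xs k := by
  have h0 : k < xs.length := by omega
  have h1 : k + 1 < xs.length := by omega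
  have h2 : k + 2 < xs.length := by omega
  have s2 := List.sum_take_succ xs (k + 2) h2
  have s1 := List.sum_take_succ xs (k + 1) h1
  have s0 := List.sum_take_succ xs k h0
  simp only [show k + 2 + 1 = k + 3 from by omega] at s2
  simp only [show k + 1 + 1 = k + 2 from by omega] at s1
  simp only [pvW, List.getD_eq_getElem?_getD, List.getElem?_eq_getElem h0,
    List.getElem?_eq_getElem h1, List.getElem?_eq_getElem h2, Option.getD_some]
  omega

-- B computes: first k < n-2 with window sum 3, else 0
theorem pvB_char (xs : List Int) :
    find_first_triple_one_alt xs
      = match (List.range (xs.length - 2)).find? (fun k => pvW xs k == 3) with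
        | some k => (k : Int)
        | none => 0 := by
  have hz : find_first_triple_one_alt xs
      = match (PySem.List.pyRange 0 ((xs.length : Int) - 2) 1).find?
          (fun i => (PySem.List.pyGet? (pvBPrefix xs) (i + 3)).getD 0
            - (PySem.List.pyGet? (pvBPrefix xs) i).getD 0 == 3) with
        | some i => i
        | none => 0 := rfl
  rw [hz, PySem.List.pyRange_one]
  have hlen : ((xs.length : Int) - 2 - 0).toNat = xs.length - 2 := by omega
  rw [hlen, List.find?_map]
  rw [pvFind?_congr (List.range (xs.length - 2))
      (_ ∘ (fun k : Nat => (0 : Int) + k)) (fun k => pvW xs k == 3) ?_]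
  · cases h : (List.range (xs.length - 2)).find? (fun k => pvW xs k == 3) with
    | none => simp
    | some k =>
      simp only [Option.map_some]
      simp
  · intro k hk
    rw [List.mem_range] at hk
    simp only [Function.comp]
    have hz : (0 : Int) + (k : Int) = (k : Int) := by ring
    rw [hz]
    have h3 : (k : Int) + 3 = ((k + 3 : Nat) : Int) := by push_cast; ring
    rw [h3, pvP_get xs (k + 3) (by omega), pvP_get xs k (by omega)]
    rw [pvSum_take_diff xs k (by omega)]

theorem pvW_step (xs : List Int) (i : Nat) (h3 : 3 ≤ i) (hi : i < xs.length) :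
    pvW xs (i - 2) = pvW xs (i - 3) + (PySem.List.pyGet? xs (i : Int)).getD 0
      - (PySem.List.pyGet? xs ((i : Int) - 3)).getD 0 := by
  have e : ((i : Int) - 3) = ((i - 3 : Nat) : Int) := by omega
  rw [e, PySem.List.pyGet?_natCast, PySem.List.pyGet?_natCast]
  have e1 : i - 3 + 1 = i - 2 := by omega
  have e2 : i - 3 + 2 = i - 1 := by omega
  have e3 : i - 2 + 1 = i - 1 := by omega
  have e4 : i - 2 + 2 = i := by omega
  simp only [pvW, e1, e2, e3, e4, List.getD_eq_getElem?_getD]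
  rw [List.getElem?_eq_getElem hi, List.getElem?_eq_getElem (by omega : i - 3 < xs.length)]
  simp
  ring

theorem pvALoop_char (xs : List Int) (i : Nat) (h3 : 3 ≤ i) (hn : i ≤ xs.length) :
    pvALoop xs i (pvW xs (i - 3))
      = match (List.range' (i - 2) (xs.length - i)).find? (fun k => pvW xs k == 3) with
        | some k => (k : Int)
        | none => 0 := by
  have hfuel : ∀ fuel i, 3 ≤ i → i ≤ xs.length → xs.length - i ≤ fuel →
      pvALoop xs i (pvW xs (i - 3))
        = match (List.range' (i - 2) (xs.length - i)).find? (fun k => pvW xs k == 3) with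
          | some k => (k : Int)
          | none => 0 := by
    intro fuel
    induction fuel with
    | zero =>
      intro i h3 hn hf
      have : xs.length - i = 0 := by omega
      rw [this]
      rw [pvALoop]
      simp only [List.range'_zero, List.find?_nil]
      have : ¬ i < xs.length := by omega
      simp [this]
    | succ m ih =>
      intro i h3 hn hf
      rw [pvALoop]
      by_cases hlt : i < xs.length
      · simp only [hlt, dif_pos]
        rw [← pvW_step xs i h3 hlt]
        have hcnt : xs.length - i = (xs.length - (i + 1)) + 1 := by omega
        rw [hcnt, List.range'_succ]
        simp only [List.find?]
        by_cases hw : pvW xs (i - 2) = 3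
        · simp only [hw, if_pos, beq_self_eq_true]
          have : ((i - 2 : Nat) : Int) = (i : Int) - 2 := by omega
          simp [this]
        · have hb : (pvW xs (i - 2) == 3) = false := by simp [hw]
          rw [if_neg hw, hb]
          have e6 : i - 2 + 1 = (i + 1) - 2 := by omega
          have e5 : i - 2 = (i + 1) - 3 := by omega
          rw [e6, e5]
          exact ih (i + 1) (by omega) (by omega) (by omega)
      · have : xs.length - i = 0 := by omega
        rw [this]
        simp [hlt]
  exact hfuel (xs.length - i) i h3 hn (le_refl _)

-- ===== VERDICT (by name: the statement is the Claim_ definition above) =====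
theorem find_first_triple_one_spec : Claim_equal_find_first_triple_one := by
  intro xs _
  unfold Spec_find_first_triple_one
  rw [pvB_char]
  unfold find_first_triple_one
  by_cases hs : xs.length < 3
  · have : xs.length - 2 = 0 := by omega
    simp [hs, this]
  · simp only [hs, if_false]
    have h0 : 0 < xs.length := by omega
    have h1 : 1 < xs.length := by omega
    have h2 : 2 < xs.length := by omega
    have hw0 : (PySem.List.pyGet? xs 0).getD 0 + (PySem.List.pyGet? xs 1).getD 0
        + (PySem.List.pyGet? xs 2).getD 0 = pvW xs 0 := by
      have g0 := PySem.List.pyGet?_ofNat xs 0 h0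
      have g1 := PySem.List.pyGet?_ofNat xs 1 h1
      have g2 := PySem.List.pyGet?_ofNat xs 2 h2
      norm_num at g0 g1 g2
      rw [g0, g1, g2]
      simp [pvW, List.getD_eq_getElem?_getD, h0, h1, h2]
    rw [hw0]
    have hrange : List.range (xs.length - 2) = 0 :: List.range' 1 (xs.length - 3) := by
      rw [List.range_eq_range']
      have : xs.length - 2 = (xs.length - 3) + 1 := by omega
      rw [this, List.range'_succ]
    rw [hrange]
    simp only [List.find?]
    by_cases hw : pvW xs 0 = 3
    · simp [hw]
    · have hb : (pvW xs 0 == 3) = false := by simp [hw]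
      rw [if_neg hw, hb]
      have := pvALoop_char xs 3 (le_refl 3) (by omega)
      simpa using this
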